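-- pv_equiv track=rewrite | github.com/leathakkor/video-animation-pipeline | render-images-from-video-data.py | convertData
-- ===== SOURCE A (Python) =====
-- def convertData(items):
--     rez = []
--     rez_i = 0
--     while True:
--         rez_in = []
--         for i in range(rez_i * 48, (rez_i + 1) * 48, 2):
--             if (len(items) <= i):
--                 while len(rez_in) <24:
--                     rez_in.append(0)
--                 rez.append(rez_in)
--                 return rez;
--             rez_in.append(abs(items[i]))
--         rez.append(rez_in)
--         rez_i += 1
-- ===== SOURCE B (Python) =====
-- def convertData(items):
--     vals = [abs(items[i]) for i in range(0, len(items), 2)]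
--
--     def row(r):
--         chunk = vals[24 * r: 24 * r + 24]
--         return chunk + [0] * (24 - len(chunk))
--
--     return [row(r) for r in range(len(vals) // 24 + 1)]
-- ===== Notes on version B (the rewrite author's own statement) =====
-- stated objective: simpler
-- what changed: A's fused extract-and-chunk loop with an inline pad-and-return is replaced by two separated passes: build the strided abs list once, then reshape it into len//24+1 padded rows of 24 by slicing.
import Mathlib
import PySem

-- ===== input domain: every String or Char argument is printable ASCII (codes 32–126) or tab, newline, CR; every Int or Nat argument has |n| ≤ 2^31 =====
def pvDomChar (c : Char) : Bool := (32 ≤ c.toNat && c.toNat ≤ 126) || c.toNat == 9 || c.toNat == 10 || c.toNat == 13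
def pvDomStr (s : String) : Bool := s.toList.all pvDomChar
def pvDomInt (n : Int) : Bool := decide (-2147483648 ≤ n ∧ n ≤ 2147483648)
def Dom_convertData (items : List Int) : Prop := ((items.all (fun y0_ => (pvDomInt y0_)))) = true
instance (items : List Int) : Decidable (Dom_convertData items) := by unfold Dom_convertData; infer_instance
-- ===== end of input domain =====

-- B replaces A's fused extract-and-chunk loop (with its inline pad-and-return) by two
-- separated passes: build the strided abs list, then reshape it into len//24+1 padded rows.

-- ===== PORT A =====
-- inner 'for i in range(rez_i*48, (rez_i+1)*48, 2)' body: k iterations left, i the current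
-- index, rez_in the row so far.  'items[i]' is ported as getD, exact because it is only
-- evaluated under the guard 'i < len(items)'.  Bool = early 'return' taken.
def convInnerA (items : List Int) : Nat → Nat → List Int → List Int × Bool
  | 0, _, rez_in => (rez_in, false)
  | k + 1, i, rez_in =>
    if items.length ≤ i then
      (rez_in ++ List.replicate (24 - rez_in.length) 0, true)
    else
      convInnerA items k (i + 2) (rez_in ++ [|items.getD i 0|])

-- 'while True' loop over rez_i; fuel only makes the loop total (proved large enough below).
def convOuterA (items : List Int) : Nat → Nat → List (List Int) → List (List Int)
  | 0, _, rez => rez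
  | fuel + 1, rez_i, rez =>
    match convInnerA items 24 (rez_i * 48) [] with
    | (rez_in, true) => rez ++ [rez_in]
    | (rez_in, false) => convOuterA items fuel (rez_i + 1) (rez ++ [rez_in])

def convertData (items : List Int) : List (List Int) :=
  convOuterA items (items.length / 48 + 2) 0 []

-- ===== PORT B =====
-- vals = [abs(items[i]) for i in range(0, len(items), 2)]  ('items[i]' via pyGet?, always in range)
def valsB (items : List Int) : List Int :=
  (PySem.List.pyRange 0 (items.length : Int) 2).map
    (fun i => |(PySem.List.pyGet? items i).getD 0|)

-- chunk = vals[24*r : 24*r+24];  chunk + [0]*(24-len(chunk))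
def rowB (vals : List Int) (r : Nat) : List Int :=
  let chunk := PySem.List.slice vals (some (24 * (r : Int))) (some (24 * (r : Int) + 24))
  chunk ++ List.replicate (24 - chunk.length) 0

def convertData_alt (items : List Int) : List (List Int) :=
  (List.range ((valsB items).length / 24 + 1)).map (rowB (valsB items))

-- ===== PRECONDITION & SPEC =====
def Spec_convertData (items : List Int) (out : List (List Int)) : Prop := out = convertData_alt items
instance (items : List Int) (out : List (List Int)) : Decidable (Spec_convertData items out) := by unfold Spec_convertData; infer_instance

-- ===== CLAIM (what is proved, stated in full; the proofs are below) =====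
def Claim_equal_convertData : Prop := ∀ (items : List Int), Dom_convertData items → Spec_convertData items (convertData items)

-- ===== LEMMAS AND PROOFS =====

-- the every-other-element abs list starting at index i (common characterisation)
def svals (items : List Int) (i : Nat) : List Int :=
  if items.length ≤ i then [] else |items.getD i 0| :: svals items (i + 2)
termination_by items.length - i
decreasing_by omega

def pad (chunk : List Int) : List Int := chunk ++ List.replicate (24 - chunk.length) 0

-- chunks of 24 with a final padded (possibly all-zero) row — the common shape
def chunks24 (vs : List Int) : List (List Int) :=
  if _h : 24 ≤ vs.length then vs.take 24 :: chunks24 (vs.drop 24) else [pad vs]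
termination_by vs.length
decreasing_by simp; omega

theorem svals_nil (items : List Int) (i : Nat) (h : items.length ≤ i) : svals items i = [] := by
  rw [svals]; simp [h]

theorem svals_cons (items : List Int) (i : Nat) (h : ¬ items.length ≤ i) :
    svals items i = |items.getD i 0| :: svals items (i + 2) := by
  rw [svals]; simp [h]

theorem svals_drop (items : List Int) (t i : Nat) :
    (svals items i).drop t = svals items (i + 2 * t) := by
  induction t generalizing i with
  | zero => simp
  | succ t ih =>
    by_cases h : items.length ≤ i
    · rw [svals_nil items i h, svals_nil items _ (by omega)]; simp
    · rw [svals_cons items i h]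
      have := ih (i + 2)
      simp only [List.drop_succ_cons]
      rw [this]; ring_nf

theorem svals_len (items : List Int) (i : Nat) :
    2 * (svals items i).length + i ≤ items.length + 1 ∨ svals items i = [] := by
  induction hi : items.length - i using Nat.strong_induction_on generalizing i with
  | _ n ih =>
    by_cases h : items.length ≤ i
    · right; exact svals_nil items i h
    · left
      rw [svals_cons items i h]
      rcases ih (items.length - (i + 2)) (by omega) (i + 2) rfl with h2 | h2
      · simp; omega
      · rw [h2]; simp; omega

theorem convInnerA_eq (items : List Int) (k : Nat) :
    ∀ (i : Nat) (acc : List Int), convInnerA items k i acc =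
      if k ≤ (svals items i).length then (acc ++ (svals items i).take k, false)
      else (acc ++ svals items i ++ List.replicate (24 - (acc ++ svals items i).length) 0, true) := by
  induction k with
  | zero => intro i acc; simp [convInnerA]
  | succ k ih =>
    intro i acc
    by_cases h : items.length ≤ i
    · rw [svals_nil items i h]
      simp [convInnerA, h]
    · rw [svals_cons items i h]
      simp only [convInnerA, if_neg h, ih]
      by_cases hk : k ≤ (svals items (i + 2)).length
      · rw [if_pos hk, if_pos (by simp; omega)]
        simp
      · rw [if_neg hk, if_neg (by simp; omega)]
        simp

theorem convOuterA_eq (items : List Int) (fuel : Nat) :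
    ∀ (rez_i : Nat) (rez : List (List Int)),
      (svals items (rez_i * 48)).length < 24 * fuel →
      convOuterA items fuel rez_i rez = rez ++ chunks24 (svals items (rez_i * 48)) := by
  induction fuel with
  | zero => intro _ _ h; omega
  | succ fuel ih =>
    intro rez_i rez h
    rw [convOuterA, convInnerA_eq]
    by_cases h24 : 24 ≤ (svals items (rez_i * 48)).length
    · rw [if_pos h24]
      show convOuterA items fuel (rez_i + 1) (rez ++ [[] ++ (svals items (rez_i * 48)).take 24]) = _
      have hdrop : (svals items (rez_i * 48)).drop 24 = svals items ((rez_i + 1) * 48) := by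
        rw [svals_drop]; ring_nf
      rw [ih (rez_i + 1) _ (by rw [← hdrop]; simp; omega), ← hdrop]
      conv_rhs => rw [chunks24]
      rw [dif_pos h24]
      simp
    · rw [if_neg h24]
      show rez ++ [[] ++ svals items (rez_i * 48) ++
        List.replicate (24 - ([] ++ svals items (rez_i * 48)).length) 0] = _
      conv_rhs => rw [chunks24]
      rw [dif_neg h24]
      simp [pad]

theorem convertData_eq (items : List Int) : convertData items = chunks24 (svals items 0) := by
  have hb := svals_len items 0
  have hlen : (svals items 0).length < 24 * (items.length / 48 + 2) := by
    rcases hb with hb | hb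
    · omega
    · rw [hb]; simp only [List.length_nil]; omega
  have := convOuterA_eq items (items.length / 48 + 2) 0 [] (by simpa using hlen)
  simpa [convertData] using this

-- B's strided comprehension is svals at 0
theorem valsB_aux (items : List Int) (c : Nat) :
    ∀ (j : Nat), c = (items.length + 1) / 2 - j →
      (List.range c).map (fun k => |items.getD (2 * (j + k)) 0|) = svals items (2 * j) := by
  induction c with
  | zero =>
    intro j hc
    rw [svals_nil items (2 * j) (by omega)]
    simp
  | succ c ih =>
    intro j hc
    rw [List.range_succ_eq_map]
    rw [svals_cons items (2 * j) (by omega)]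
    simp only [List.map_cons, List.map_map]
    congr 1
    rw [show (2 * j + 2) = 2 * (j + 1) by ring, ← ih (j + 1) (by omega)]
    apply List.map_congr_left
    intro k _
    have harg : 2 * (j + (k + 1)) = 2 * (j + 1 + k) := by ring
    simp only [Function.comp_apply, harg]

theorem valsB_eq (items : List Int) : valsB items = svals items 0 := by
  unfold valsB
  rw [PySem.List.pyRange_of_pos 0 (items.length : Int) (by norm_num)]
  have hcount : (if (0 : Int) < (items.length : Int)
      then (((items.length : Int) - 0 + 2 - 1) / 2).toNat else 0) = (items.length + 1) / 2 := by
    split_ifs with h <;> omega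
  rw [hcount, List.map_map]
  have := valsB_aux items ((items.length + 1) / 2) 0 (by omega)
  rw [show 2 * 0 = 0 by ring] at this
  rw [← this]
  apply List.map_congr_left
  intro k hk
  simp only [List.mem_range] at hk
  have h2k : 2 * (0 + k) < items.length := by omega
  simp only [Function.comp]
  have hcast : (0 : Int) + 2 * (k : Int) = ((2 * k : Nat) : Int) := by push_cast; ring
  rw [hcast, PySem.List.pyGet?_natCast]
  simp [List.getD, List.getElem?_eq_getElem (show 2 * k < items.length from by omega)]

theorem rowB_eq (vals : List Int) (r : Nat) :
    rowB vals r = pad ((vals.drop (24 * r)).take 24) := by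
  unfold rowB pad
  rw [show (24 * (r : Int) + 24) = ((24 * r + 24 : Nat) : Int) by push_cast; ring,
    show (24 * (r : Int)) = ((24 * r : Nat) : Int) by push_cast; ring,
    PySem.List.slice_natCast]
  simp

theorem chunks24_eq_map (vs : List Int) :
    (List.range (vs.length / 24 + 1)).map (fun r => pad ((vs.drop (24 * r)).take 24)) = chunks24 vs := by
  induction hn : vs.length using Nat.strong_induction_on generalizing vs with
  | _ n ih =>
    subst hn
    by_cases h : 24 ≤ vs.length
    · rw [chunks24, dif_pos h]
      have hq : vs.length / 24 + 1 = ((vs.drop 24).length / 24 + 1) + 1 := by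
        simp; omega
      rw [hq, List.range_succ_eq_map, List.map_cons, List.map_map]
      congr 1
      · simp [pad]
        omega
      · rw [← ih ((vs.drop 24).length) (by simp; omega) (vs.drop 24) rfl]
        apply List.map_congr_left
        intro k _
        simp [Function.comp, List.drop_drop]
        ring_nf
    · rw [chunks24, dif_neg h]
      have : vs.length / 24 = 0 := by omega
      rw [this]
      simp [pad, List.take_of_length_le (by omega : vs.length ≤ 24)]
      omega

-- ===== VERDICT (by name: the statement is the Claim_ definition above) =====
theorem convertData_spec : Claim_equal_convertData := by
  intro items _
  unfold Spec_convertData convertData_alt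
  rw [convertData_eq, valsB_eq]
  rw [← chunks24_eq_map (svals items 0)]
  apply List.map_congr_left
  intro r _
  rw [rowB_eq]
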